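-- pv_equiv track=rewrite | github.com/hsavarese/ai-blog-generator-interview-HunterSavarese | ai_generator.py | replace_affiliate_links
-- ===== SOURCE A (Python) =====
-- def replace_affiliate_links(text):
--     dummy_links = {
--         "{AFF_LINK_1}": "https://example.com/affiliate/product1",
--         "{AFF_LINK_2}": "https://example.com/affiliate/product2",
--         "{AFF_LINK_3}": "https://example.com/affiliate/product3"
--     }
--
--     for placeholder, url in dummy_links.items():
--         text = text.replace(placeholder, url)
--     return text
-- ===== SOURCE B (Python) =====
-- def replace_affiliate_links(text):
--     dummy_links = {
--         "{AFF_LINK_1}": "https://example.com/affiliate/product1",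
--         "{AFF_LINK_2}": "https://example.com/affiliate/product2",
--         "{AFF_LINK_3}": "https://example.com/affiliate/product3"
--     }
--     parts = []
--     i = 0
--     n = len(text)
--     while i < n:
--         if text[i] == "{":
--             url = dummy_links.get(text[i:i + 12])
--             if url is not None:
--                 parts.append(url)
--                 i += 12
--                 continue
--         parts.append(text[i])
--         i += 1
--     return "".join(parts)
-- ===== Notes on version B (the rewrite author's own statement) =====
-- stated objective: alternative
-- what changed: A runs three separate full str.replace passes (one per placeholder); B makes a single left-to-right pass over the text, dispatching each 12-character chunk starting at an opening brace through the placeholder table once.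
import Mathlib
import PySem

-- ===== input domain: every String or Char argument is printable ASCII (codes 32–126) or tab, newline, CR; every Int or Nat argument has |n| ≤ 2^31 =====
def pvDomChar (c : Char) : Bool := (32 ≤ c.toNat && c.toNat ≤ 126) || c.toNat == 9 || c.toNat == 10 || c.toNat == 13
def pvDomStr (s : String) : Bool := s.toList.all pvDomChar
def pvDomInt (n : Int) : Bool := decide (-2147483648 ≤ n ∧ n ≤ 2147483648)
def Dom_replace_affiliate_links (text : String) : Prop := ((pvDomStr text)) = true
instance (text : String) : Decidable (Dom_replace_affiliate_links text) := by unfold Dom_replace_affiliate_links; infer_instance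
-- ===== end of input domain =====

-- B replaces A's three full str.replace passes by a single left-to-right scan that dispatches
-- each 12-character chunk starting at an opening brace through the placeholder table once (objective: alternative).

-- ===== PORT A =====
def pvDummyLinks : List (String × String) :=
  [("{AFF_LINK_1}", "https://example.com/affiliate/product1"),
   ("{AFF_LINK_2}", "https://example.com/affiliate/product2"),
   ("{AFF_LINK_3}", "https://example.com/affiliate/product3")]

def replace_affiliate_links (text : String) : String :=
  pvDummyLinks.foldl (fun t pu => PySem.Str.replace t pu.1 pu.2) text

-- ===== PORT B =====
def pvTable : PySem.Dict (List Char) (List Char) :=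
  PySem.Dict.ofList
    [("{AFF_LINK_1}".toList, "https://example.com/affiliate/product1".toList),
     ("{AFF_LINK_2}".toList, "https://example.com/affiliate/product2".toList),
     ("{AFF_LINK_3}".toList, "https://example.com/affiliate/product3".toList)]

-- the while-loop of Source B: one pass, table lookup on the 12-char slice after each '{'
def pvScan : List Char → List Char
  | [] => []
  | c :: t =>
    if c = '{' then
      match PySem.Dict.get? pvTable (List.take 12 (c :: t)) with
      | some url => url ++ pvScan (t.drop 11)
      | none => c :: pvScan t
    else c :: pvScan t
termination_by s => s.length
decreasing_by all_goals (simp; try omega)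

def replace_affiliate_links_alt (text : String) : String :=
  String.ofList (pvScan text.toList)

-- ===== PRECONDITION & SPEC =====
def Spec_replace_affiliate_links (text : String) (out : String) : Prop := out = replace_affiliate_links_alt text
instance (text : String) (out : String) : Decidable (Spec_replace_affiliate_links text out) := by unfold Spec_replace_affiliate_links; infer_instance

-- ===== CLAIM (what is proved, stated in full; the proofs are below) =====
def Claim_equal_replace_affiliate_links : Prop := ∀ (text : String), Dom_replace_affiliate_links text → Spec_replace_affiliate_links text (replace_affiliate_links text)

-- ===== LEMMAS AND PROOFS =====

-- fuel-free form of one str.replace pass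
def pvRep (old new : List Char) : List Char → List Char
  | [] => []
  | c :: t =>
    if old.isPrefixOf (c :: t) then new ++ pvRep old new (t.drop (old.length - 1))
    else c :: pvRep old new t
termination_by s => s.length
decreasing_by all_goals (simp; try omega)

-- the three placeholders / urls, as char lists
def pvP1 : List Char := "{AFF_LINK_1}".toList
def pvP2 : List Char := "{AFF_LINK_2}".toList
def pvP3 : List Char := "{AFF_LINK_3}".toList
def pvU1 : List Char := "https://example.com/affiliate/product1".toList
def pvU2 : List Char := "https://example.com/affiliate/product2".toList
def pvU3 : List Char := "https://example.com/affiliate/product3".toList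

lemma pvGo_eq (old new : List Char) (hold : old ≠ []) :
    ∀ (fuel : Nat) (l acc : List Char), l.length ≤ fuel →
      PySem.Chars.replace.go old new fuel l acc = acc.reverse ++ pvRep old new l := by
  intro fuel
  induction fuel with
  | zero =>
    intro l acc hl
    have : l = [] := List.length_eq_zero_iff.mp (Nat.le_zero.mp hl)
    subst this
    simp [PySem.Chars.replace.go, pvRep]
  | succ f ih =>
    intro l acc hl
    match l with
    | [] => simp [PySem.Chars.replace.go, pvRep]
    | c :: t =>
      rw [PySem.Chars.replace.go]
      by_cases hp : old.isPrefixOf (c :: t)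
      · have hlen : 1 ≤ old.length := by
          cases old with
          | nil => exact absurd rfl hold
          | cons a o => simp
        have hdrop : (c :: t).drop old.length = t.drop (old.length - 1) := by
          cases old with
          | nil => exact absurd rfl hold
          | cons a o => simp
        rw [if_pos hp, ih _ _ (by simp at hl ⊢; omega), hdrop]
        rw [pvRep, if_pos hp]
        simp
      · rw [if_neg hp, ih _ _ (by simp at hl; omega)]
        rw [pvRep, if_neg hp]
        simp

lemma pvReplace_eq (old new s : List Char) (hold : old ≠ []) :
    PySem.Chars.replace s old new = pvRep old new s := by
  rw [PySem.Chars.replace, if_neg (by simpa using hold)]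
  simpa using pvGo_eq old new hold s.length s [] le_rfl

lemma pvRep_cons_pos (old new : List Char) (c : Char) (t : List Char)
    (hp : old.isPrefixOf (c :: t)) :
    pvRep old new (c :: t) = new ++ pvRep old new (t.drop (old.length - 1)) := by
  rw [pvRep, if_pos hp]

lemma pvRep_cons_neg (old new : List Char) (c : Char) (t : List Char)
    (hp : ¬ old.isPrefixOf (c :: t)) :
    pvRep old new (c :: t) = c :: pvRep old new t := by
  rw [pvRep, if_neg hp]

lemma pvRep_append_nohead (h : Char) (o' new a x : List Char) (hha : h ∉ a) :
    pvRep (h :: o') new (a ++ x) = a ++ pvRep (h :: o') new x := by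
  induction a with
  | nil => simp
  | cons b a' ih =>
    have hnp : ¬ (h :: o').isPrefixOf (b :: (a' ++ x)) := by
      simp only [List.isPrefixOf_cons₂]
      intro hcon
      have : h = b := by
        have := (Bool.and_eq_true _ _).mp hcon
        simpa using this.1
      exact hha (by simp [this])
    rw [List.cons_append, pvRep_cons_neg _ _ _ _ hnp, ih (fun hm => hha (by simp [hm]))]
    simp

lemma pvRep_prefix_back (h : Char) (o' new : List Char) (hnew : new ≠ []) :
    ∀ (n : Nat) (t p : List Char), t.length ≤ n → h ∉ p → (∀ a ∈ p, a ∉ new) →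
      p <+: pvRep (h :: o') new t → p <+: t := by
  intro n
  induction n with
  | zero =>
    intro t p ht _ _ hpre
    have : t = [] := List.length_eq_zero_iff.mp (Nat.le_zero.mp ht)
    subst this
    simpa [pvRep] using hpre
  | succ m ih =>
    intro t p ht hhp hpn hpre
    match t with
    | [] => simpa [pvRep] using hpre
    | c :: t' =>
      by_cases hp : (h :: o').isPrefixOf (c :: t')
      · rw [pvRep_cons_pos _ _ _ _ hp] at hpre
        match p with
        | [] => exact List.nil_prefix
        | a :: p' =>
          obtain ⟨n0, n'', hn⟩ : ∃ n0 n'', new = n0 :: n'' := by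
            cases new with
            | nil => exact absurd rfl hnew
            | cons n0 n'' => exact ⟨n0, n'', rfl⟩
          subst hn
          have ha : a = n0 := (List.cons_prefix_cons.mp (by simpa using hpre)).1
          exact absurd (by simp [ha] : a ∈ n0 :: n'') (hpn a (by simp))
      · rw [pvRep_cons_neg _ _ _ _ hp] at hpre
        match p with
        | [] => exact List.nil_prefix
        | a :: p' =>
          obtain ⟨hac, hpre'⟩ := List.cons_prefix_cons.mp hpre
          have h1 : p' <+: t' :=
            ih t' p' (by simpa using ht) (fun hm => hhp (by simp [hm]))
              (fun b hb => hpn b (by simp [hb])) hpre'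
          exact List.cons_prefix_cons.mpr ⟨hac, h1⟩

-- placeholder tails (everything after the leading '{')
def pvQ1 : List Char := "AFF_LINK_1}".toList
def pvQ2 : List Char := "AFF_LINK_2}".toList
def pvQ3 : List Char := "AFF_LINK_3}".toList

lemma pvP1_eq : pvP1 = '{' :: pvQ1 := by decide
lemma pvP2_eq : pvP2 = '{' :: pvQ2 := by decide
lemma pvP3_eq : pvP3 = '{' :: pvQ3 := by decide

lemma pvItems : pvTable.items = [(pvP1, pvU1), (pvP2, pvU2), (pvP3, pvU3)] := by decide

lemma pvGet_none (k : List Char) (h1 : k ≠ pvP1) (h2 : k ≠ pvP2) (h3 : k ≠ pvP3) :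
    PySem.Dict.get? pvTable k = none := by
  have e1 : (pvP1 == k) = false := beq_eq_false_iff_ne.mpr (Ne.symm h1)
  have e2 : (pvP2 == k) = false := beq_eq_false_iff_ne.mpr (Ne.symm h2)
  have e3 : (pvP3 == k) = false := beq_eq_false_iff_ne.mpr (Ne.symm h3)
  simp [PySem.Dict.get?, pvItems, List.find?, e1, e2, e3]

lemma pvTake12 (c : Char) (t p : List Char) (hlen : p.length = 12) (hp : p <+: (c :: t)) :
    (c :: t).take 12 = p := by
  rw [List.prefix_iff_eq_take] at hp
  rw [← hlen, ← hp]

lemma pvScan_pos1 (c : Char) (t : List Char) (hp : pvP1 <+: (c :: t)) :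
    pvScan (c :: t) = pvU1 ++ pvScan (t.drop 11) := by
  have hc : c = '{' := ((List.cons_prefix_cons.mp (pvP1_eq ▸ hp)).1).symm
  rw [pvScan, if_pos hc, pvTake12 c t pvP1 (by decide) hp,
    (by decide : PySem.Dict.get? pvTable pvP1 = some pvU1)]

lemma pvScan_pos2 (c : Char) (t : List Char) (hp : pvP2 <+: (c :: t)) :
    pvScan (c :: t) = pvU2 ++ pvScan (t.drop 11) := by
  have hc : c = '{' := ((List.cons_prefix_cons.mp (pvP2_eq ▸ hp)).1).symm
  rw [pvScan, if_pos hc, pvTake12 c t pvP2 (by decide) hp,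
    (by decide : PySem.Dict.get? pvTable pvP2 = some pvU2)]

lemma pvScan_pos3 (c : Char) (t : List Char) (hp : pvP3 <+: (c :: t)) :
    pvScan (c :: t) = pvU3 ++ pvScan (t.drop 11) := by
  have hc : c = '{' := ((List.cons_prefix_cons.mp (pvP3_eq ▸ hp)).1).symm
  rw [pvScan, if_pos hc, pvTake12 c t pvP3 (by decide) hp,
    (by decide : PySem.Dict.get? pvTable pvP3 = some pvU3)]

lemma pvScan_neg (c : Char) (t : List Char)
    (h1 : ¬ pvP1 <+: (c :: t)) (h2 : ¬ pvP2 <+: (c :: t)) (h3 : ¬ pvP3 <+: (c :: t)) :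
    pvScan (c :: t) = c :: pvScan t := by
  by_cases hc : c = '{'
  · have hk : ∀ p : List Char, p.length = 12 → ¬ p <+: (c :: t) → (c :: t).take 12 ≠ p := by
      intro p hlen hnp he
      exact hnp (List.prefix_iff_eq_take.mpr (by rw [hlen, he]))
    rw [pvScan, if_pos hc,
      pvGet_none _ (hk pvP1 (by decide) h1) (hk pvP2 (by decide) h2) (hk pvP3 (by decide) h3)]
  · rw [pvScan, if_neg hc]

lemma pvQ2_disj_U1 : ∀ a ∈ pvQ2, a ∉ pvU1 := by
  have h : (pvQ2.all (fun a => !(pvU1.contains a))) = true := by decide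
  simpa using h

lemma pvQ3_disj_U1 : ∀ a ∈ pvQ3, a ∉ pvU1 := by
  have h : (pvQ3.all (fun a => !(pvU1.contains a))) = true := by decide
  simpa using h

lemma pvQ3_disj_U2 : ∀ a ∈ pvQ3, a ∉ pvU2 := by
  have h : (pvQ3.all (fun a => !(pvU2.contains a))) = true := by decide
  simpa using h

lemma pvNotPrefixOf (p : List Char) (c : Char) (t : List Char) (h : ¬ p <+: (c :: t)) :
    ¬ p.isPrefixOf (c :: t) := by
  rw [List.isPrefixOf_iff_prefix]; exact h

-- the heart: the three sequential replace passes equal the one-pass scan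
lemma pvMainAux : ∀ (n : Nat) (s : List Char), s.length ≤ n →
    pvRep pvP3 pvU3 (pvRep pvP2 pvU2 (pvRep pvP1 pvU1 s)) = pvScan s := by
  intro n
  induction n with
  | zero =>
    intro s hs
    have : s = [] := List.length_eq_zero_iff.mp (Nat.le_zero.mp hs)
    subst this
    simp [pvRep, pvScan]
  | succ m ih =>
    intro s hs
    match s with
    | [] => simp [pvRep, pvScan]
    | c :: t =>
      have hlt : t.length ≤ m := by simpa using hs
      have hld : (t.drop 11).length ≤ m := le_trans (by simp) hlt
      by_cases h1 : pvP1 <+: (c :: t)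
      · -- placeholder 1 sits here: all three passes and the scan emit pvU1 and move on
        have r1 : pvRep pvP1 pvU1 (c :: t) = pvU1 ++ pvRep pvP1 pvU1 (t.drop 11) := by
          rw [pvRep_cons_pos _ _ _ _ (by rw [List.isPrefixOf_iff_prefix]; exact h1),
            (by decide : pvP1.length - 1 = 11)]
        rw [r1, pvP2_eq, pvRep_append_nohead _ _ _ _ _ (by decide), ← pvP2_eq,
          pvP3_eq, pvRep_append_nohead _ _ _ _ _ (by decide), ← pvP3_eq,
          ih _ hld, pvScan_pos1 c t h1]
      · by_cases h2 : pvP2 <+: (c :: t)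
        · -- placeholder 2: pass 1 walks over it untouched, pass 2 replaces it
          have hc : c = '{' := ((List.cons_prefix_cons.mp (pvP2_eq ▸ h2)).1).symm
          have hq : pvQ2 <+: t := (List.cons_prefix_cons.mp (pvP2_eq ▸ h2)).2
          obtain ⟨x, hx⟩ := hq
          have hdx : t.drop 11 = x := by rw [← hx, List.drop_left' (by decide)]
          have r1 : pvRep pvP1 pvU1 (c :: t) = pvP2 ++ pvRep pvP1 pvU1 x := by
            rw [pvRep_cons_neg _ _ _ _ (pvNotPrefixOf _ _ _ h1), ← hx,
              pvP1_eq, pvRep_append_nohead _ _ _ _ _ (by decide), hc, pvP2_eq]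
            simp
          have r2 : ∀ z, pvRep pvP2 pvU2 (pvP2 ++ z) = pvU2 ++ pvRep pvP2 pvU2 z := by
            intro z
            have hpre : ('{' :: pvQ2).isPrefixOf ('{' :: (pvQ2 ++ z)) := by
              rw [List.isPrefixOf_iff_prefix, ← List.cons_append, ← pvP2_eq]
              exact List.prefix_append _ _
            have hd : (pvQ2 ++ z).drop (('{' :: pvQ2).length - 1) = z := by
              rw [(by decide : ('{' :: pvQ2).length - 1 = 11)]
              exact List.drop_left' (by decide)
            rw [pvP2_eq, List.cons_append, pvRep_cons_pos _ _ _ _ hpre, hd]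
          rw [r1, r2, pvP3_eq, pvRep_append_nohead _ _ _ _ _ (by decide), ← pvP3_eq,
            ih _ (hdx ▸ hld), pvScan_pos2 c t h2, hdx]
        · by_cases h3 : pvP3 <+: (c :: t)
          · -- placeholder 3: passes 1 and 2 walk over it, pass 3 replaces it
            have hc : c = '{' := ((List.cons_prefix_cons.mp (pvP3_eq ▸ h3)).1).symm
            have hq : pvQ3 <+: t := (List.cons_prefix_cons.mp (pvP3_eq ▸ h3)).2
            obtain ⟨x, hx⟩ := hq
            have hdx : t.drop 11 = x := by rw [← hx, List.drop_left' (by decide)]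
            have r1 : pvRep pvP1 pvU1 (c :: t) = pvP3 ++ pvRep pvP1 pvU1 x := by
              rw [pvRep_cons_neg _ _ _ _ (pvNotPrefixOf _ _ _ h1), ← hx,
                pvP1_eq, pvRep_append_nohead _ _ _ _ _ (by decide), hc, pvP3_eq]
              simp
            have r2 : ∀ z, pvRep pvP2 pvU2 (pvP3 ++ z) = pvP3 ++ pvRep pvP2 pvU2 z := by
              intro z
              have hnp : ¬ pvP2.isPrefixOf ('{' :: (pvQ3 ++ z)) := by
                rw [List.isPrefixOf_iff_prefix, List.prefix_iff_eq_take]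
                intro he
                rw [(by decide : pvP2.length = 12), List.take_succ_cons,
                  List.take_left' (by decide)] at he
                exact absurd he (by decide)
              rw [pvP3_eq, List.cons_append, pvRep_cons_neg _ _ _ _ hnp,
                pvP2_eq, pvRep_append_nohead _ _ _ _ _ (by decide), ← pvP2_eq]
              simp
            have r3 : ∀ z, pvRep pvP3 pvU3 (pvP3 ++ z) = pvU3 ++ pvRep pvP3 pvU3 z := by
              intro z
              have hpre : ('{' :: pvQ3).isPrefixOf ('{' :: (pvQ3 ++ z)) := by
                rw [List.isPrefixOf_iff_prefix, ← List.cons_append, ← pvP3_eq]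
                exact List.prefix_append _ _
              have hd : (pvQ3 ++ z).drop (('{' :: pvQ3).length - 1) = z := by
                rw [(by decide : ('{' :: pvQ3).length - 1 = 11)]
                exact List.drop_left' (by decide)
              rw [pvP3_eq, List.cons_append, pvRep_cons_pos _ _ _ _ hpre, hd]
            rw [r1, r2, r3, ih _ (hdx ▸ hld), pvScan_pos3 c t h3, hdx]
          · -- no placeholder here: every pass keeps c and moves one character on
            have r1 : pvRep pvP1 pvU1 (c :: t) = c :: pvRep pvP1 pvU1 t :=
              pvRep_cons_neg _ _ _ _ (pvNotPrefixOf _ _ _ h1)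
            have n2 : ¬ pvP2.isPrefixOf (c :: pvRep pvP1 pvU1 t) := by
              rw [List.isPrefixOf_iff_prefix, pvP2_eq]
              intro hcon
              obtain ⟨hc, hq⟩ := List.cons_prefix_cons.mp hcon
              have : pvQ2 <+: t := by
                refine pvRep_prefix_back '{' pvQ1 pvU1 (by decide) t.length t pvQ2 le_rfl
                  (by decide) pvQ2_disj_U1 ?_
                rw [← pvP1_eq]; exact hq
              exact h2 (pvP2_eq ▸ List.cons_prefix_cons.mpr ⟨hc, this⟩)
            have n3 : ¬ pvP3.isPrefixOf (c :: pvRep pvP2 pvU2 (pvRep pvP1 pvU1 t)) := by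
              rw [List.isPrefixOf_iff_prefix, pvP3_eq]
              intro hcon
              obtain ⟨hc, hq⟩ := List.cons_prefix_cons.mp hcon
              have s2 : pvQ3 <+: pvRep pvP1 pvU1 t := by
                refine pvRep_prefix_back '{' pvQ2 pvU2 (by decide)
                  (pvRep pvP1 pvU1 t).length (pvRep pvP1 pvU1 t) pvQ3 le_rfl
                  (by decide) pvQ3_disj_U2 ?_
                rw [← pvP2_eq]; exact hq
              have s1 : pvQ3 <+: t := by
                refine pvRep_prefix_back '{' pvQ1 pvU1 (by decide) t.length t pvQ3 le_rfl
                  (by decide) pvQ3_disj_U1 ?_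
                rw [← pvP1_eq]; exact s2
              exact h3 (pvP3_eq ▸ List.cons_prefix_cons.mpr ⟨hc, s1⟩)
            rw [r1, pvRep_cons_neg _ _ _ _ n2, pvRep_cons_neg _ _ _ _ n3,
              ih _ hlt, pvScan_neg c t h1 h2 h3]

lemma pvMain : ∀ (s : List Char),
    pvRep pvP3 pvU3 (pvRep pvP2 pvU2 (pvRep pvP1 pvU1 s)) = pvScan s :=
  fun s => pvMainAux s.length s le_rfl

-- ===== VERDICT (by name: the statement is the Claim_ definition above) =====
theorem replace_affiliate_links_spec : Claim_equal_replace_affiliate_links := by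
  intro text _
  unfold Spec_replace_affiliate_links replace_affiliate_links replace_affiliate_links_alt pvDummyLinks
  simp only [List.foldl]
  rw [← pvMain text.toList]
  simp only [PySem.Str.replace, String.toList_ofList]
  rw [pvReplace_eq _ _ _ (by decide), pvReplace_eq _ _ _ (by decide), pvReplace_eq _ _ _ (by decide)]
  simp only [pvP1, pvP2, pvP3, pvU1, pvU2, pvU3]
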